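-- pv_equiv track=rewrite | github.com/g4gekkouga/Machine-Learning | K_Means_Clusters/Clusters.py | sort_clusters
-- ===== SOURCE A (Python) =====
-- def unique(list1):
--     unique_list = []
--     for x in list1:
--         if x not in unique_list:
--             unique_list.append(x)
--     return unique_list
--
-- def sort_clusters(values):
--     c_val = unique(values)
--     c_val.sort()
--     clusters = []
--     for i in range(len(c_val)):
--         lst = []
--         for j in range(len(values)):
--             if values[j] == c_val[i]:
--                 lst.append(j)
--         clusters.append(lst)
--     return clusters
-- ===== SOURCE B (Python) =====
-- def sort_clusters(values):
--     groups = {}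
--     for i, x in enumerate(values):
--         groups.setdefault(x, []).append(i)
--     return [groups[k] for k in sorted(groups)]
-- ===== Notes on version B (the rewrite author's own statement) =====
-- stated objective: faster
-- what changed: Replaces the dedup-then-nested-rescan (one full pass over values per distinct value) with a single-pass dict grouping value->indices followed by sorting the keys.
import Mathlib
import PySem

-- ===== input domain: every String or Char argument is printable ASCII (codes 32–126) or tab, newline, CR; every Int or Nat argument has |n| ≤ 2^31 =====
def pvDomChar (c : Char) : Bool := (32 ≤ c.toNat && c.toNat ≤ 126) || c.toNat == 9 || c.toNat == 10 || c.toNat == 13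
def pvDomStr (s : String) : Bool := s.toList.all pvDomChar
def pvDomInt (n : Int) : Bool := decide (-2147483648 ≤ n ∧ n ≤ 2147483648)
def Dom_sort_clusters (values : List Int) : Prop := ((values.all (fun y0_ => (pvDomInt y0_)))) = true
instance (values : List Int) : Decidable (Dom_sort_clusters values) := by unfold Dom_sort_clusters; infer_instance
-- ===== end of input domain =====

-- B replaces A's per-distinct-value rescan of values by one dict-grouping pass plus a key sort (faster, asymptotic).

-- ===== PORT A =====
def pyUnique (list1 : List Int) : List Int :=
  list1.foldl (fun unique_list x => if unique_list.contains x then unique_list else unique_list ++ [x]) []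

def sort_clusters (values : List Int) : List (List Int) :=
  let c_val := PySem.List.sorted (pyUnique values) (fun x => x) false
  (PySem.List.pyRange 0 (c_val.length : Int) 1).foldl
    (fun clusters i =>
      clusters ++ [(PySem.List.pyRange 0 (values.length : Int) 1).foldl
        (fun lst j =>
          if PySem.List.pyGetD values j 0 = PySem.List.pyGetD c_val i 0 then lst ++ [j] else lst) []])
    []

-- ===== PORT B =====
def sort_clusters_alt (values : List Int) : List (List Int) :=
  let groups := (PySem.List.enumerate values 0).foldl
    (fun d p => d.insert p.2 (d.getD p.2 [] ++ [p.1])) PySem.Dict.empty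
  (PySem.List.sorted groups.keys (fun k => k) false).map (fun k => groups.getD k [])

-- ===== PRECONDITION & SPEC =====
def Spec_sort_clusters (values : List Int) (out : List (List Int)) : Prop := out = sort_clusters_alt values
instance (values : List Int) (out : List (List Int)) : Decidable (Spec_sort_clusters values out) := by unfold Spec_sort_clusters; infer_instance

-- ===== CLAIM (what is proved, stated in full; the proofs are below) =====
def Claim_equal_sort_clusters : Prop := ∀ (values : List Int), Dom_sort_clusters values → Spec_sort_clusters values (sort_clusters values)

-- ===== LEMMAS AND PROOFS =====

-- B's grouping dict: its keys are the distinct values in first-occurrence order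
theorem build_keys (xs : List Int) (s : Int) (d : PySem.Dict Int (List Int)) :
    ((PySem.List.enumerate xs s).foldl
      (fun d p => d.insert p.2 (d.getD p.2 [] ++ [p.1])) d).keys
    = PySem.Set.update d.keys xs := by
  induction xs generalizing s d with
  | nil => simp [PySem.List.enumerate_nil, PySem.Set.update]
  | cons x xs ih =>
    rw [PySem.List.enumerate_cons]
    simp only [List.foldl_cons, ih]
    by_cases h : d.contains x = true
    · rw [PySem.Dict.keys_insert_of_contains _ _ h]
      have hx : PySem.Set.add d.keys x = d.keys := by
        simp [PySem.Set.add, PySem.Set.contains,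
          (PySem.Dict.contains_iff_mem_keys (d := d) (k := x)).mp h]
      simp [PySem.Set.update, hx]
    · have h' : d.contains x = false := by simpa using h
      rw [PySem.Dict.keys_insert_of_not_contains _ _ h']
      have hx : PySem.Set.add d.keys x = d.keys ++ [x] := by
        simp only [PySem.Set.add, PySem.Set.contains]
        have hm : ¬ x ∈ d.keys := fun hm =>
          h ((PySem.Dict.contains_iff_mem_keys (d := d) (k := x)).mpr hm)
        simp [hm]
      simp [PySem.Set.update, hx]

-- B's grouping dict: the bucket of v is the enumerated indices whose value is v
theorem build_getD (xs : List Int) (s : Int) (d : PySem.Dict Int (List Int)) (v : Int) :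
    ((PySem.List.enumerate xs s).foldl
      (fun d p => d.insert p.2 (d.getD p.2 [] ++ [p.1])) d).getD v []
    = d.getD v [] ++ ((PySem.List.enumerate xs s).filter (fun p => p.2 == v)).map (·.1) := by
  induction xs generalizing s d with
  | nil => simp [PySem.List.enumerate_nil]
  | cons x xs ih =>
    rw [PySem.List.enumerate_cons]
    simp only [List.foldl_cons, List.filter_cons]
    by_cases h : x = v
    · subst h
      simp [ih, PySem.Dict.getD_insert_self]
    · have hb : ((s, x).2 == v) = false := by simp [h]
      simp only [hb, Bool.false_eq_true, if_false]
      rw [ih]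
      congr 1
      exact PySem.Dict.getD_insert_of_ne _ _ _ (fun hv => h hv.symm)

-- both programs compute, for each value v, the same Bool-filtered index list
theorem bucket_eq (values : List Int) (v : Int) :
    ((PySem.List.enumerate values 0).foldl
      (fun d p => d.insert p.2 (d.getD p.2 [] ++ [p.1])) PySem.Dict.empty).getD v []
    = (PySem.List.pyRange 0 (values.length : Int) 1).filter
        (fun j => decide (PySem.List.pyGetD values j 0 = v)) := by
  rw [build_getD]
  rw [PySem.List.enumerate_eq_map_pyRange (d := 0)]
  simp only [List.filter_map, List.map_map, Function.comp_def, PySem.Dict.getD_empty,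
    List.nil_append]
  rw [List.map_id']
  apply List.filter_congr
  intro j _
  exact rfl

theorem sort_clusters_spec' (values : List Int) :
    sort_clusters values = sort_clusters_alt values := by
  unfold sort_clusters sort_clusters_alt
  have hkeys : ((PySem.List.enumerate values 0).foldl
      (fun d p => d.insert p.2 (d.getD p.2 [] ++ [p.1])) PySem.Dict.empty).keys
      = pyUnique values := by
    rw [build_keys]
    rfl
  simp only [hkeys]
  -- A's inner loop is a filter, its outer loop a map over the sorted distinct values
  have houter :
      (PySem.List.pyRange 0 ((PySem.List.sorted (pyUnique values) (fun x => x) false).length : Int) 1).foldl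
        (fun clusters i =>
          clusters ++ [(PySem.List.pyRange 0 (values.length : Int) 1).foldl
            (fun lst j =>
              if PySem.List.pyGetD values j 0 = PySem.List.pyGetD (PySem.List.sorted (pyUnique values) (fun x => x) false) i 0 then lst ++ [j] else lst) []])
        []
      = (PySem.List.sorted (pyUnique values) (fun x => x) false).map
          (fun v => (PySem.List.pyRange 0 (values.length : Int) 1).filter
            (fun j => decide (PySem.List.pyGetD values j 0 = v))) := by
    rw [PySem.List.foldl_append_singleton_eq_map]
    rw [show (PySem.List.sorted (pyUnique values) (fun x => x) false).map
          (fun v => (PySem.List.pyRange 0 (values.length : Int) 1).filter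
            (fun j => decide (PySem.List.pyGetD values j 0 = v)))
        = ((PySem.List.pyRange 0 ((PySem.List.sorted (pyUnique values) (fun x => x) false).length : Int) 1).map
            (fun i => PySem.List.pyGetD (PySem.List.sorted (pyUnique values) (fun x => x) false) i 0)).map
          (fun v => (PySem.List.pyRange 0 (values.length : Int) 1).filter
            (fun j => decide (PySem.List.pyGetD values j 0 = v)))
        from by rw [PySem.List.map_pyGetD_pyRange_zero']]
    rw [List.map_map]
    apply List.map_congr_left
    intro i _
    simp only [Function.comp_def]
    rw [PySem.List.foldl_append_ite_eq_filter]
    simp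
  rw [houter, List.map_congr_left]
  intro v _
  exact (bucket_eq values v).symm

-- ===== VERDICT (by name: the statement is the Claim_ definition above) =====
theorem sort_clusters_spec : Claim_equal_sort_clusters := by
  intro values _
  exact sort_clusters_spec' values
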